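-- pv_equiv track=rewrite | github.com/neoblazes/wonpago | play_go.py | PlayGo
-- ===== SOURCE A (Python) =====
-- BLACK = 1
--
-- WHITE = 2
--
-- def NearPositions(x, y):
--   return [pos for pos in [(x-1, y), (x+1, y), (x, y-1), (x, y+1)]
--           if pos[0] > 0 and pos[0] < 10 and pos[1] > 0 and pos[1] < 10]
--
-- def GetConnented(board, group, x, y):
--   # TODO group = set()
--   group.add((x, y))
--   stone = board[y][x]
--   for pos in NearPositions(x, y):
--     if board[pos[1]][pos[0]] == stone and not (pos[0], pos[1]) in group:
--       GetConnented(board, group, pos[0], pos[1])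
--
-- def GetLibertySet(board, group):
--   liberty = set()
--   # It should check dup of liberty. Just ok to check 0 or Ko.
--   for pos in group:
--     for n_pos in NearPositions(pos[0], pos[1]):
--       if board[n_pos[1]][n_pos[0]] == 0:
--         liberty.add((n_pos[0], n_pos[1]))
--   return liberty
--
-- def GetLiberty(board, group):
--   return len(GetLibertySet(board, group))
--
-- def CaptureGroup(board, group):
--   for pos in group:
--     board[pos[1]][pos[0]] = 0
--
-- def IsOpponentStone(target, source):
--   return target in (BLACK, WHITE) and target != source
--
-- def EncodePos(x, y):
--   return y * 10 + x
--
-- def DecodePos(pos):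
--   return [pos % 10, int(pos / 10)]
--
-- def PlayGo(board, turn, action):
--   if action % 10 == 0:  # mod 0 is used for special actions
--     return True, 0
--   x, y = DecodePos(action)
--   if board[y][x] != 0:
--     return False, 0
--   board[y][x] = turn
--
--   # Capture stones
--   capture_count = 0
--   capture_pos = None
--   for pos in NearPositions(x, y):
--     if IsOpponentStone(board[pos[1]][pos[0]], turn):
--       group = set()
--       GetConnented(board, group, pos[0], pos[1])
--       liberty = GetLiberty(board, group)
--       if liberty == 0:
--         CaptureGroup(board, group)
--         capture_count = capture_count + len(group)
--         capture_pos = pos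
--
--   # Check forbidden move
--   group = set()
--   GetConnented(board, group, x, y)
--   if GetLiberty(board, group) == 0:
--     board[y][x] = 0
--     return False, 0
--
--   # Check Ko
--   if capture_count == 1:
--     if len(group) == 1 and GetLiberty(board, group) == 1:
--       return True, EncodePos(capture_pos[0], capture_pos[1])
--   return True, 0
-- ===== SOURCE B (Python) =====
-- BLACK = 1
--
-- WHITE = 2
--
-- def _Neighbors(x, y):
--   return [(nx, ny) for nx, ny in ((x-1, y), (x+1, y), (x, y-1), (x, y+1))
--           if 0 < nx < 10 and 0 < ny < 10]
--
-- def _Flood(board, x, y):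
--   """One explicit-stack worklist pass computing the group AND its liberty set
--   together (A recurses to build the group, then rescans it for liberties)."""
--   stone = board[y][x]
--   group, libs = set(), set()
--   stack = [(x, y)]
--   while stack:
--     p = stack.pop()
--     if p in group or board[p[1]][p[0]] != stone:
--       continue
--     group.add(p)
--     ns = _Neighbors(p[0], p[1])
--     for n in ns:
--       if board[n[1]][n[0]] == 0:
--         libs.add(n)
--     stack.extend(reversed(ns))
--   return group, libs
--
-- def PlayGo(board, turn, action):
--   if action % 10 == 0:  # mod 0 is used for special actions
--     return True, 0
--   x, y = action % 10, int(action / 10)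
--   if board[y][x] != 0:
--     return False, 0
--   board[y][x] = turn
--
--   captured = 0
--   last_pos = None
--   for pos in _Neighbors(x, y):
--     target = board[pos[1]][pos[0]]
--     if target in (BLACK, WHITE) and target != turn:
--       group, libs = _Flood(board, pos[0], pos[1])
--       if not libs:
--         for px, py in group:
--           board[py][px] = 0
--         captured += len(group)
--         last_pos = pos
--
--   group, libs = _Flood(board, x, y)
--   if not libs:
--     board[y][x] = 0
--     return False, 0
--   if captured == 1 and len(group) == 1 and len(libs) == 1:
--     return True, last_pos[1] * 10 + last_pos[0]
--   return True, 0
-- ===== Notes on version B (the rewrite author's own statement) =====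
-- stated objective: alternative
-- what changed: A's recursive DFS (GetConnented) plus a separate group-rescan for liberties (GetLibertySet, called up to twice per group) is replaced by a single explicit-stack worklist pass that computes the group and its liberty set together, and the one flood of the placed group serves both the suicide and the Ko check.
-- outside the precondition, e.g. on PlayGo([[0, 0], [0, 0]], 1, 1): A returns (True, 0), B returns (True, 0)
import Mathlib
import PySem

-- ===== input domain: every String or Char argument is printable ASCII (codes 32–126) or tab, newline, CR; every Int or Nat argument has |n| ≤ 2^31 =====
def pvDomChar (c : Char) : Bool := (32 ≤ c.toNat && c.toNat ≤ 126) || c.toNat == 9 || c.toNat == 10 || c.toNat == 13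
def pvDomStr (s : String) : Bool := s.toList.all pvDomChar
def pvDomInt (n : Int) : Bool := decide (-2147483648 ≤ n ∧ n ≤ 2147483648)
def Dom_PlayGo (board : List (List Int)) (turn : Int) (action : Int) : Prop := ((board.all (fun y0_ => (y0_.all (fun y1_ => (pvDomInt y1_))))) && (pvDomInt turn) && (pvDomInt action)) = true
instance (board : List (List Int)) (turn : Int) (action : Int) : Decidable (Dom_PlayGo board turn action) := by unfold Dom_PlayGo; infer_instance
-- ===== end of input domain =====

-- B replaces A's recursive DFS (GetConnented) plus the separate liberty rescan of the group
-- (GetLibertySet) by ONE explicit-stack worklist pass that computes the group and its liberty set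
-- together, computed once and reused for the suicide and Ko checks (objective: alternative).
-- Both Pythons mutate `board` identically in place; the equivalence proved here is about the
-- return value, with the evolving board threaded functionally through both ports.

-- ===== PORT A =====
-- board[y][x] read / write (the defaults only matter outside Pre_, where Python raises)
def readC (board : List (List Int)) (x y : Int) : Int :=
  PySem.List.pyGetD (PySem.List.pyGetD board y []) x 0

def writeC (board : List (List Int)) (x y v : Int) : List (List Int) :=
  PySem.List.pySetD board y (PySem.List.pySetD (PySem.List.pyGetD board y []) x v)

-- NearPositions
def nearA (x y : Int) : List (Int × Int) :=
  ([(x-1, y), (x+1, y), (x, y-1), (x, y+1)]).filter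
    (fun p => decide (0 < p.1) && decide (p.1 < 10) && decide (0 < p.2) && decide (p.2 < 10))

-- GetConnented: recursive DFS threading the group set; fuel is a termination guard only
-- (each nested call adds a fresh cell of the 9×9 grid, so fuel 100 is never exhausted inside Pre_)
mutual
def getConnA (board : List (List Int)) : Nat → PySem.Set (Int × Int) → Int → Int → PySem.Set (Int × Int)
  | 0, group, x, y => PySem.Set.add group (x, y)
  | fuel+1, group, x, y =>
      goConnA board fuel (readC board x y) (PySem.Set.add group (x, y)) (nearA x y)
  termination_by f _ _ _ => (f, 0)

def goConnA (board : List (List Int)) (fuel : Nat) (stone : Int) :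
    PySem.Set (Int × Int) → List (Int × Int) → PySem.Set (Int × Int)
  | group, [] => group
  | group, pos :: rest =>
      if readC board pos.1 pos.2 = stone ∧ PySem.Set.contains group pos = false then
        goConnA board fuel stone (getConnA board fuel group pos.1 pos.2) rest
      else
        goConnA board fuel stone group rest
  termination_by _ ns => (fuel, ns.length + 1)
end

-- GetLibertySet
def libSetA (board : List (List Int)) (group : PySem.Set (Int × Int)) : PySem.Set (Int × Int) :=
  group.foldl
    (fun lib pos =>
      (nearA pos.1 pos.2).foldl
        (fun lib n => if readC board n.1 n.2 = 0 then PySem.Set.add lib n else lib) lib)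
    PySem.Set.empty

-- CaptureGroup
def captureA (board : List (List Int)) (group : PySem.Set (Int × Int)) : List (List Int) :=
  group.foldl (fun b pos => writeC b pos.1 pos.2 0) board

def PlayGo (board : List (List Int)) (turn : Int) (action : Int) : Bool × Int :=
  if PySem.Int.mod action 10 = 0 then (true, 0)
  else
    let x := PySem.Int.mod action 10
    -- DecodePos: int(action / 10) truncates toward zero; exact as Int.tdiv for |action| ≤ 2^31
    let y := Int.tdiv action 10
    if readC board x y ≠ 0 then (false, 0)
    else
      let board1 := writeC board x y turn
      let st :=
        (nearA x y).foldl
          (fun (acc : List (List Int) × Int × Option (Int × Int)) pos =>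
            let target := readC acc.1 pos.1 pos.2
            if (target = 1 ∨ target = 2) ∧ target ≠ turn then  -- IsOpponentStone
              let group := getConnA acc.1 100 PySem.Set.empty pos.1 pos.2
              if PySem.Set.len (libSetA acc.1 group) = 0 then
                (captureA acc.1 group, acc.2.1 + PySem.Set.len group, some pos)
              else acc
            else acc)
          (board1, (0 : Int), (none : Option (Int × Int)))
      let group := getConnA st.1 100 PySem.Set.empty x y
      if PySem.Set.len (libSetA st.1 group) = 0 then (false, 0)
      else if st.2.1 = 1 ∧ PySem.Set.len group = 1 ∧ PySem.Set.len (libSetA st.1 group) = 1 then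
        -- capture_pos is always set when capture_count == 1, so the `none` default is unreachable
        (true, (st.2.2.getD (0, 0)).2 * 10 + (st.2.2.getD (0, 0)).1)
      else (true, 0)

-- ===== PORT B =====
-- _Neighbors
def nbrsB (x y : Int) : List (Int × Int) :=
  ([(x-1, y), (x+1, y), (x, y-1), (x, y+1)]).filter
    (fun p => decide (0 < p.1 ∧ p.1 < 10 ∧ 0 < p.2 ∧ p.2 < 10))

-- _Flood's while loop: the Python stack (top = last element) is ported reversed: `stack.pop()` is
-- the head and `stack.extend(reversed(ns))` is `ns ++ stack`.  State is the pair (group, libs);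
-- fuel decreases only on accepted pops, each of which adds a fresh cell of the 9×9 grid, so fuel
-- 100 is never exhausted inside Pre_.
def floodLibB (board : List (List Int)) (stone : Int) :
    Nat → PySem.Set (Int × Int) × PySem.Set (Int × Int) → List (Int × Int) →
      PySem.Set (Int × Int) × PySem.Set (Int × Int)
  | _, gl, [] => gl
  | fuel, (g, l), p :: stk =>
      if PySem.Set.contains g p = true ∨ readC board p.1 p.2 ≠ stone then
        floodLibB board stone fuel (g, l) stk
      else
        match fuel with
        | 0 => (g, l)
        | f+1 =>
            floodLibB board stone f
              (PySem.Set.add g p,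
               (nbrsB p.1 p.2).foldl
                 (fun l n => if readC board n.1 n.2 = 0 then PySem.Set.add l n else l) l)
              (nbrsB p.1 p.2 ++ stk)
  termination_by fuel _ stk => (fuel, stk.length)

-- _Flood
def floodB (board : List (List Int)) (x y : Int) :
    PySem.Set (Int × Int) × PySem.Set (Int × Int) :=
  floodLibB board (readC board x y) 100 (PySem.Set.empty, PySem.Set.empty) [(x, y)]

-- the capture loop, as a tail recursion over the neighbour list threading (board, captured, last_pos)
def scanCapsB (turn : Int) :
    List (List Int) → Int → Option (Int × Int) → List (Int × Int) →
      List (List Int) × Int × Option (Int × Int)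
  | b, cnt, cp, [] => (b, cnt, cp)
  | b, cnt, cp, pos :: rest =>
      let target := readC b pos.1 pos.2
      if (target = 1 ∨ target = 2) ∧ target ≠ turn then
        match floodB b pos.1 pos.2 with
        | (g, libs) =>
          if libs = [] then
            scanCapsB turn (g.foldl (fun bb q => writeC bb q.1 q.2 0) b)
              (cnt + PySem.Set.len g) (some pos) rest
          else scanCapsB turn b cnt cp rest
      else scanCapsB turn b cnt cp rest

def PlayGo_alt (board : List (List Int)) (turn : Int) (action : Int) : Bool × Int :=
  if PySem.Int.mod action 10 = 0 then (true, 0)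
  else
    let x := PySem.Int.mod action 10
    -- int(action / 10) truncates toward zero; exact as Int.tdiv for |action| ≤ 2^31
    let y := Int.tdiv action 10
    if readC board x y ≠ 0 then (false, 0)
    else
      match scanCapsB turn (writeC board x y turn) 0 none (nbrsB x y) with
      | (b2, captured, lastPos) =>
        match floodB b2 x y with
        | (g, libs) =>
          if libs = [] then (false, 0)
          else if captured = 1 ∧ PySem.Set.len g = 1 ∧ PySem.Set.len libs = 1 then
            (true, (lastPos.getD (0, 0)).2 * 10 + (lastPos.getD (0, 0)).1)
          else (true, 0)

-- ===== PRECONDITION & SPEC =====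
-- Pre_ keeps exactly: special actions (action % 10 == 0), an existing occupied target cell, an empty
-- target cell on a negative row (no neighbours, always a suicide return), and the ordinary case of a
-- board that is at least 10x10 on the playable rows with the decoded row in 1..9.  It excludes inputs
-- on which A raises IndexError, and the few inputs on which A returns only by reaching a position
-- outside the Go grid through Python's negative-index wraparound or an undersized board (B happens to
-- return the same value there; see the cites).
def Pre_PlayGo (board : List (List Int)) (turn : Int) (action : Int) : Prop :=
  PySem.Int.mod action 10 = 0 ∨
  (let x := PySem.Int.mod action 10
   let y := Int.tdiv action 10
   let cell := (PySem.List.pyGet? board y).bind (fun row => PySem.List.pyGet? row x)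
   (cell ≠ none ∧ cell ≠ some 0) ∨
   (cell = some 0 ∧ y ≤ -1) ∨
   (1 ≤ y ∧ y ≤ 9 ∧ 10 ≤ board.length ∧ ∀ row ∈ (board.drop 1).take 9, 10 ≤ row.length))

instance (board : List (List Int)) (turn : Int) (action : Int) : Decidable (Pre_PlayGo board turn action) := by
  unfold Pre_PlayGo; infer_instance

def pvWitness_PlayGo : List (List Int) × Int × Int :=
  (List.replicate 10 (List.replicate 10 (0 : Int)), 1, 55)

def Spec_PlayGo (board : List (List Int)) (turn : Int) (action : Int) (out : Bool × Int) : Prop :=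
  out = PlayGo_alt board turn action
instance (board : List (List Int)) (turn : Int) (action : Int) (out : Bool × Int) :
    Decidable (Spec_PlayGo board turn action out) := by unfold Spec_PlayGo; infer_instance

-- ===== CLAIM (what is proved, stated in full; the proofs are below) =====
def Claim_equal_PlayGo : Prop :=
  ∀ (board : List (List Int)) (turn : Int) (action : Int),
    Dom_PlayGo board turn action → Pre_PlayGo board turn action →
      Spec_PlayGo board turn action (PlayGo board turn action)

-- ===== LEMMAS AND PROOFS =====

theorem nbrsB_eq_nearA : nbrsB = nearA := by
  funext x y
  unfold nbrsB nearA
  congr 1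
  funext p
  simp [Bool.and_assoc]

-- ghost flood fill (proof only): B's worklist with the group component alone
def floodG (board : List (List Int)) (stone : Int)
    (fuel : Nat) (group : PySem.Set (Int × Int)) : List (Int × Int) → PySem.Set (Int × Int)
  | [] => group
  | p :: stk =>
      if PySem.Set.contains group p = true ∨ readC board p.1 p.2 ≠ stone then
        floodG board stone fuel group stk
      else
        match fuel with
        | 0 => group
        | f+1 => floodG board stone f (PySem.Set.add group p) (nearA p.1 p.2 ++ stk)
  termination_by stk => (fuel, stk.length)

theorem floodG_nil (board : List (List Int)) (s : Int) (f : Nat) (g : PySem.Set (Int × Int)) :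
    floodG board s f g [] = g := by
  rw [floodG.eq_def]

theorem floodG_cons (board : List (List Int)) (s : Int) (f : Nat) (g : PySem.Set (Int × Int))
    (p : Int × Int) (stk : List (Int × Int)) :
    floodG board s f g (p :: stk) =
      if PySem.Set.contains g p = true ∨ readC board p.1 p.2 ≠ s then floodG board s f g stk
      else
        match f with
        | 0 => g
        | f'+1 => floodG board s f' (PySem.Set.add g p) (nearA p.1 p.2 ++ stk) := by
  rw [floodG.eq_def]

theorem floodLibB_nil (board : List (List Int)) (s : Int) (f : Nat)
    (gl : PySem.Set (Int × Int) × PySem.Set (Int × Int)) :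
    floodLibB board s f gl [] = gl := by
  rw [floodLibB.eq_def]

theorem floodLibB_cons (board : List (List Int)) (s : Int) (f : Nat)
    (g l : PySem.Set (Int × Int)) (p : Int × Int) (stk : List (Int × Int)) :
    floodLibB board s f (g, l) (p :: stk) =
      if PySem.Set.contains g p = true ∨ readC board p.1 p.2 ≠ s then
        floodLibB board s f (g, l) stk
      else
        match f with
        | 0 => (g, l)
        | f'+1 =>
            floodLibB board s f'
              (PySem.Set.add g p,
               (nbrsB p.1 p.2).foldl
                 (fun l n => if readC board n.1 n.2 = 0 then PySem.Set.add l n else l) l)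
              (nbrsB p.1 p.2 ++ stk) := by
  rw [floodLibB.eq_def]

-- the 9×9 playable grid as a finite set (computable, for the fuel bounds)
def gridL : List Int := [1, 2, 3, 4, 5, 6, 7, 8, 9]

def gridF : Finset (Int × Int) := (gridL.flatMap (fun i => gridL.map (fun j => (i, j)))).toFinset

theorem mem_gridL {a : Int} : a ∈ gridL ↔ 1 ≤ a ∧ a ≤ 9 := by
  simp [gridL]; omega

theorem card_gridF : gridF.card = 81 := by decide

theorem mem_gridF_of_mem_nearA {x y : Int} {p : Int × Int} (h : p ∈ nearA x y) : p ∈ gridF := by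
  unfold nearA at h
  rw [List.mem_filter] at h
  obtain ⟨-, hc⟩ := h
  simp only [Bool.and_eq_true, decide_eq_true_eq] at hc
  unfold gridF
  simp only [List.mem_toFinset, List.mem_flatMap, List.mem_map]
  obtain ⟨a, b⟩ := p
  simp only at hc
  exact ⟨a, mem_gridL.mpr (by omega), b, mem_gridL.mpr (by omega), rfl⟩

theorem length_nearA_le (x y : Int) : (nearA x y).length ≤ 4 := by
  have := List.length_filter_le
    (fun (p : Int × Int) => decide (0 < p.1) && decide (p.1 < 10) && decide (0 < p.2) && decide (p.2 < 10))
    [(x-1, y), (x+1, y), (x, y-1), (x, y+1)]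
  simpa [nearA] using this

theorem contains_eq_false_iff {g : PySem.Set (Int × Int)} {p : Int × Int} :
    PySem.Set.contains g p = false ↔ p ∉ g := by
  unfold PySem.Set.contains
  simp

theorem toFinset_add (g : PySem.Set (Int × Int)) (p : Int × Int) :
    (PySem.Set.add g p).toFinset = insert p g.toFinset := by
  unfold PySem.Set.add
  by_cases h : PySem.Set.contains g p = true
  · rw [if_pos h]
    have hp : p ∈ g := by unfold PySem.Set.contains at h; simpa using h
    rw [Finset.insert_eq_self.2 (List.mem_toFinset.2 hp)]
  · rw [if_neg h]
    simp [List.toFinset_append]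

theorem mem_add_of_mem {g : PySem.Set (Int × Int)} {p q : Int × Int} (h : q ∈ g) :
    q ∈ PySem.Set.add g p := by
  rw [PySem.Set.mem_add]; exact Or.inl h

-- the group only grows during A's DFS
theorem getConnA_mono (board : List (List Int)) :
    ∀ (f : Nat) (g : PySem.Set (Int × Int)) (x y : Int), g ⊆ getConnA board f g x y := by
  intro f
  induction f with
  | zero =>
      intro g x y a ha
      rw [getConnA]
      exact mem_add_of_mem ha
  | succ f ih =>
      have go : ∀ (s : Int) (ns : List (Int × Int)) (g : PySem.Set (Int × Int)),
          g ⊆ goConnA board f s g ns := by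
        intro s ns
        induction ns with
        | nil => intro g a ha; rw [goConnA]; exact ha
        | cons pos rest ihr =>
            intro g a ha
            by_cases h : readC board pos.1 pos.2 = s ∧ PySem.Set.contains g pos = false
            · rw [goConnA, if_pos h]
              exact ihr _ (ih g pos.1 pos.2 ha)
            · rw [goConnA, if_neg h]
              exact ihr _ ha
      intro g x y a ha
      rw [getConnA]
      exact go _ _ _ (mem_add_of_mem ha)

theorem card_sdiff_le_of_subset {A₀ : Finset (Int × Int)} {g g' : PySem.Set (Int × Int)}
    (h : g ⊆ g') : (A₀ \ g'.toFinset).card ≤ (A₀ \ g.toFinset).card :=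
  Finset.card_le_card (Finset.sdiff_subset_sdiff (Finset.Subset.refl _) (by
    intro a ha; exact List.mem_toFinset.2 (h (List.mem_toFinset.1 ha))))

theorem card_add_lt {A₀ : Finset (Int × Int)} {g : PySem.Set (Int × Int)} {p : Int × Int}
    (hp : p ∈ A₀) (hg : p ∉ g) :
    (A₀ \ (PySem.Set.add g p).toFinset).card + 1 = (A₀ \ g.toFinset).card := by
  rw [toFinset_add, Finset.sdiff_insert]
  have hmem : p ∈ A₀ \ g.toFinset := Finset.mem_sdiff.2 ⟨hp, fun h => hg (List.mem_toFinset.1 h)⟩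
  rw [Finset.card_erase_of_mem hmem]
  have : 0 < (A₀ \ g.toFinset).card := Finset.card_pos.2 ⟨p, hmem⟩
  omega

-- floodG is fuel-insensitive while enough fuel remains
theorem floodG_fuel_congr (board : List (List Int)) (s : Int) (A₀ : Finset (Int × Int))
    (hA : ∀ (x y : Int) (p : Int × Int), p ∈ nearA x y → p ∈ A₀) :
    ∀ (μ f f' : Nat) (g : PySem.Set (Int × Int)) (stk : List (Int × Int)),
      (∀ q ∈ stk, q ∈ A₀) →
      (A₀ \ g.toFinset).card < f → (A₀ \ g.toFinset).card < f' →
      4 * (A₀ \ g.toFinset).card + stk.length ≤ μ →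
      floodG board s f g stk = floodG board s f' g stk := by
  intro μ
  induction μ with
  | zero =>
      intro f f' g stk hstk hf hf' hμ
      have : stk = [] := List.length_eq_zero_iff.1 (by omega)
      subst this
      rw [floodG_nil, floodG_nil]
  | succ μ ih =>
      intro f f' g stk hstk hf hf' hμ
      match stk with
      | [] => rw [floodG_nil, floodG_nil]
      | p :: stk' =>
          by_cases hrej : PySem.Set.contains g p = true ∨ readC board p.1 p.2 ≠ s
          · rw [floodG_cons, if_pos hrej, floodG_cons, if_pos hrej]
            refine ih f f' g stk' (fun q hq => hstk q (List.mem_cons_of_mem _ hq)) hf hf' ?_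
            simp only [List.length_cons] at hμ
            omega
          · obtain ⟨hcon, hread'⟩ := not_or.mp hrej
            have hread : readC board p.1 p.2 = s := not_ne_iff.mp hread'
            have hcon' : PySem.Set.contains g p = false := by
              cases h : PySem.Set.contains g p with
              | true => exact absurd h hcon
              | false => rfl
            have hnot : p ∉ g := contains_eq_false_iff.1 hcon'
            have hpA : p ∈ A₀ := hstk p List.mem_cons_self
            obtain ⟨f₁, rfl⟩ : ∃ f₁, f = f₁ + 1 := ⟨f - 1, by omega⟩
            obtain ⟨f₂, rfl⟩ : ∃ f₂, f' = f₂ + 1 := ⟨f' - 1, by omega⟩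
            have hcond : ¬(PySem.Set.contains g p = true ∨ readC board p.1 p.2 ≠ s) :=
              not_or.mpr ⟨by rw [hcon']; simp, fun h => h hread⟩
            rw [floodG_cons, if_neg hcond, floodG_cons, if_neg hcond]
            have hcard := card_add_lt hpA hnot
            refine ih f₁ f₂ _ _ ?_ (by omega) (by omega) ?_
            · intro q hq
              rcases List.mem_append.1 hq with h | h
              · exact hA _ _ _ h
              · exact hstk q (List.mem_cons_of_mem _ h)
            · have h4 : (nearA p.1 p.2).length ≤ 4 := length_nearA_le _ _
              rw [List.length_append]
              simp only [List.length_cons] at hμ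
              omega

-- the simulation: A's recursive DFS equals the ghost explicit-stack flood fill
theorem sim (board : List (List Int)) (s : Int) (A₀ : Finset (Int × Int))
    (hgrid : ∀ p : Int × Int, p ∈ gridF → p ∈ A₀) (hcard : A₀.card ≤ 82) :
    ∀ (f : Nat) (g : PySem.Set (Int × Int)) (x y : Int) (stk : List (Int × Int)),
      readC board x y = s → (x, y) ∈ A₀ → (∀ q ∈ stk, q ∈ A₀) → (x, y) ∉ g →
      (A₀ \ (PySem.Set.add g (x, y)).toFinset).card < f →
      floodG board s 100 (getConnA board f g x y) stk = floodG board s 100 g ((x, y) :: stk) := by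
  have hnear : ∀ (x y : Int) (p : Int × Int), p ∈ nearA x y → p ∈ A₀ :=
    fun x y p hp => hgrid p (mem_gridF_of_mem_nearA hp)
  have hcardany : ∀ (t : PySem.Set (Int × Int)), (A₀ \ t.toFinset).card ≤ 82 :=
    fun t => le_trans (Finset.card_le_card (Finset.sdiff_subset)) hcard
  intro f
  induction f with
  | zero =>
      intro g x y stk _ _ _ _ hlt
      exact absurd hlt (Nat.not_lt_zero _)
  | succ f ih =>
      intro g x y stk hread hxyA hstk hxg hlt
      have hconF : PySem.Set.contains g (x, y) = false := contains_eq_false_iff.2 hxg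
      -- the accepted first step on the ghost side, normalised back to fuel 100
      have hstep : floodG board s 100 g ((x, y) :: stk)
          = floodG board s 100 (PySem.Set.add g (x, y)) (nearA x y ++ stk) := by
        rw [floodG_cons, if_neg (not_or.mpr ⟨by rw [hconF]; simp, fun h => h hread⟩)]
        show floodG board s 99 _ _ = _
        exact floodG_fuel_congr board s A₀ hnear
          (4 * (A₀ \ (PySem.Set.add g (x, y)).toFinset).card + (nearA x y ++ stk).length)
          99 100 _ _
          (by intro q hq; rcases List.mem_append.1 hq with h | h
              · exact hnear _ _ _ h
              · exact hstk q h)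
          (by have := hcardany (PySem.Set.add g (x, y)); omega)
          (by have := hcardany (PySem.Set.add g (x, y)); omega)
          (le_refl _)
      rw [getConnA, hread, hstep]
      -- inner: folding A's neighbour loop corresponds to the pushed stack segment
      have L2 : ∀ (ns : List (Int × Int)) (g1 : PySem.Set (Int × Int)) (stk' : List (Int × Int)),
          (∀ q ∈ ns, q ∈ A₀) → (∀ q ∈ stk', q ∈ A₀) → (A₀ \ g1.toFinset).card < f + 1 →
          floodG board s 100 (goConnA board f s g1 ns) stk' = floodG board s 100 g1 (ns ++ stk') := by
        intro ns
        induction ns with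
        | nil => intro g1 stk' _ _ _; rw [goConnA]; rfl
        | cons pos rest ihr =>
            intro g1 stk' hns hstk' hc
            obtain ⟨px, py⟩ := pos
            by_cases hg : readC board px py = s ∧ PySem.Set.contains g1 (px, py) = false
            · rw [goConnA, if_pos hg]
              have hposA : (px, py) ∈ A₀ := hns _ List.mem_cons_self
              have hposg : (px, py) ∉ g1 := contains_eq_false_iff.1 hg.2
              have hcadd := card_add_lt hposA hposg
              rw [ihr (getConnA board f g1 px py) stk'
                    (fun q hq => hns q (List.mem_cons_of_mem _ hq)) hstk'
                    (lt_of_le_of_lt (card_sdiff_le_of_subset (getConnA_mono board f g1 px py)) hc)]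
              rw [ih g1 px py (rest ++ stk') hg.1 hposA
                    (by intro q hq; rcases List.mem_append.1 hq with h | h
                        · exact hns q (List.mem_cons_of_mem _ h)
                        · exact hstk' q h)
                    hposg (by omega)]
              rfl
            · rw [goConnA, if_neg hg]
              rw [ihr g1 stk' (fun q hq => hns q (List.mem_cons_of_mem _ hq)) hstk' hc]
              have hrej : PySem.Set.contains g1 (px, py) = true ∨ readC board px py ≠ s := by
                cases h : PySem.Set.contains g1 (px, py) with
                | true => exact Or.inl rfl
                | false => exact Or.inr (fun hr => hg ⟨hr, h⟩)
              show _ = floodG board s 100 g1 ((px, py) :: (rest ++ stk'))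
              rw [floodG_cons, if_pos hrej]
      exact L2 (nearA x y) (PySem.Set.add g (x, y)) stk (fun q hq => hnear _ _ _ hq) hstk hlt

-- the ghost flood fill from a seed is A's DFS from that seed
theorem floodG_eq (board : List (List Int)) (x y : Int) :
    floodG board (readC board x y) 100 PySem.Set.empty [(x, y)]
      = getConnA board 100 PySem.Set.empty x y := by
  have h := sim board (readC board x y) (insert (x, y) gridF)
    (fun p hp => Finset.mem_insert_of_mem hp)
    (by have := Finset.card_insert_le (x, y) gridF; rw [card_gridF] at this; omega)
    100 PySem.Set.empty x y [] rfl (Finset.mem_insert_self _ _) (by intro q hq; cases hq)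
    (by simp)
    (by
      have hle : ((insert (x, y) gridF) \ (PySem.Set.add PySem.Set.empty (x, y)).toFinset).card
          ≤ (insert (x, y) gridF).card := Finset.card_le_card (Finset.sdiff_subset)
      have := Finset.card_insert_le (x, y) gridF
      rw [card_gridF] at this
      omega)
  rw [floodG_nil] at h
  exact h.symm

-- adding a fresh element appends it
theorem setAdd_append {g : PySem.Set (Int × Int)} {p : Int × Int}
    (h : PySem.Set.contains g p = false) : PySem.Set.add g p = g ++ [p] := by
  unfold PySem.Set.add
  rw [if_neg (by rw [h]; exact Bool.false_ne_true)]

-- one accepted cell extends A's liberty fold by exactly that cell's empty neighbours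
theorem libSetA_add (board : List (List Int)) (g : PySem.Set (Int × Int)) (p : Int × Int)
    (h : PySem.Set.contains g p = false) :
    libSetA board (PySem.Set.add g p)
      = (nearA p.1 p.2).foldl
          (fun l n => if readC board n.1 n.2 = 0 then PySem.Set.add l n else l)
          (libSetA board g) := by
  rw [setAdd_append h]
  unfold libSetA
  rw [List.foldl_append]
  rfl

-- B's merged worklist pass = (ghost group flood, A's liberty set of that group)
theorem floodLibB_spec (board : List (List Int)) (s : Int) :
    ∀ (f : Nat) (g l : PySem.Set (Int × Int)) (stk : List (Int × Int)),
      l = libSetA board g →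
      floodLibB board s f (g, l) stk
        = (floodG board s f g stk, libSetA board (floodG board s f g stk)) := by
  intro f
  induction f with
  | zero =>
      intro g l stk hl
      subst hl
      induction stk with
      | nil => rw [floodLibB_nil, floodG_nil]
      | cons p stk' ih =>
          rw [floodLibB_cons, floodG_cons]
          by_cases hrej : PySem.Set.contains g p = true ∨ readC board p.1 p.2 ≠ s
          · rw [if_pos hrej, if_pos hrej, ih]
          · rw [if_neg hrej, if_neg hrej]
  | succ f ihf =>
      intro g l stk hl
      subst hl
      induction stk with
      | nil => rw [floodLibB_nil, floodG_nil]
      | cons p stk' ih =>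
          rw [floodLibB_cons, floodG_cons]
          by_cases hrej : PySem.Set.contains g p = true ∨ readC board p.1 p.2 ≠ s
          · rw [if_pos hrej, if_pos hrej, ih]
          · rw [if_neg hrej, if_neg hrej]
            have hcon : PySem.Set.contains g p = false := by
              cases h : PySem.Set.contains g p with
              | true => exact absurd (Or.inl h) hrej
              | false => rfl
            rw [nbrsB_eq_nearA]
            exact ihf _ _ _ (libSetA_add board g p hcon).symm

-- B's _Flood from a seed computes A's group and A's liberty set of it
theorem floodB_eq (board : List (List Int)) (x y : Int) :
    floodB board x y
      = (getConnA board 100 PySem.Set.empty x y,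
         libSetA board (getConnA board 100 PySem.Set.empty x y)) := by
  unfold floodB
  rw [floodLibB_spec board _ 100 PySem.Set.empty PySem.Set.empty [(x, y)] rfl, floodG_eq]

theorem setLen_eq_zero (t : PySem.Set (Int × Int)) : (PySem.Set.len t = 0) = (t = []) := by
  unfold PySem.Set.len
  simp [List.length_eq_zero_iff]

-- B's tail-recursive capture scan equals A's foldl over the same neighbour list
theorem scanCapsB_eq (turn : Int) :
    ∀ (ns : List (Int × Int)) (b : List (List Int)) (cnt : Int) (cp : Option (Int × Int)),
      scanCapsB turn b cnt cp ns
        = ns.foldl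
            (fun (acc : List (List Int) × Int × Option (Int × Int)) pos =>
              let target := readC acc.1 pos.1 pos.2
              if (target = 1 ∨ target = 2) ∧ target ≠ turn then
                let group := getConnA acc.1 100 PySem.Set.empty pos.1 pos.2
                if PySem.Set.len (libSetA acc.1 group) = 0 then
                  (captureA acc.1 group, acc.2.1 + PySem.Set.len group, some pos)
                else acc
              else acc)
            (b, cnt, cp) := by
  intro ns
  induction ns with
  | nil => intro b cnt cp; rw [scanCapsB]; rfl
  | cons pos rest ih =>
      intro b cnt cp
      rw [scanCapsB, List.foldl_cons, floodB_eq]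
      by_cases hop : (readC b pos.1 pos.2 = 1 ∨ readC b pos.1 pos.2 = 2) ∧ readC b pos.1 pos.2 ≠ turn
      · rw [if_pos hop]
        simp only [if_pos hop]
        by_cases hz : libSetA b (getConnA b 100 PySem.Set.empty pos.1 pos.2) = []
        · rw [if_pos hz, ih]
          simp only [setLen_eq_zero, if_pos hz]
          rfl
        · rw [if_neg hz, ih]
          simp only [setLen_eq_zero, if_neg hz]
      · rw [if_neg hop, ih]
        simp only [if_neg hop]

theorem main_eq (board : List (List Int)) (turn : Int) (action : Int) :
    PlayGo board turn action = PlayGo_alt board turn action := by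
  unfold PlayGo PlayGo_alt
  by_cases hm : PySem.Int.mod action 10 = 0
  · rw [if_pos hm, if_pos hm]
  · rw [if_neg hm, if_neg hm]
    by_cases ho : readC board (PySem.Int.mod action 10) (Int.tdiv action 10) ≠ 0
    · rw [if_pos ho, if_pos ho]
    · rw [if_neg ho, if_neg ho]
      simp only [nbrsB_eq_nearA, scanCapsB_eq, floodB_eq, setLen_eq_zero]

-- ===== VERDICT (by name: the statement is the Claim_ definition above) =====
theorem PlayGo_spec : Claim_equal_PlayGo := by
  intro board turn action _ _
  unfold Spec_PlayGo
  exact main_eq board turn action
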